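-- pv_equiv track=rewrite | github.com/mnh-14/ludo_game | settings.py | _get_tilemap
-- ===== SOURCE A (Python) =====
-- def _get_tilemap(tile_size: int):
--     tilemap = []
--
--     for i in range(6):
--         tilemap.append((i*tile_size, 6*tile_size))
--     for i in range(6):
--         tilemap.append((6*tile_size, (5-i)*tile_size))
--     tilemap.append((7*tile_size, 0))
--     for i in range(6):
--         tilemap.append((8*tile_size, i*tile_size))
--     for i in range(6):
--         tilemap.append(((9+i)*tile_size, 6*tile_size))
--     tilemap.append((14*tile_size, 7*tile_size))
--     for i in range(6):
--         tilemap.append(((14-i)*tile_size, 8*tile_size))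
--     for i in range(6):
--         tilemap.append((8*tile_size, (9+i)*tile_size))
--     tilemap.append((7*tile_size, 14*tile_size))
--     for i in range(6):
--         tilemap.append((6*tile_size, (14-i)*tile_size))
--     for i in range(6):
--         tilemap.append(((5-i)*tile_size, 8*tile_size))
--     tilemap.append((0, 7*tile_size))
--     return tilemap
-- ===== SOURCE B (Python) =====
-- def _get_tilemap(tile_size: int):
--     # Build the first 13-tile arm in unit coordinates, then generate the other
--     # three arms by a 90-degree rotation about the board center (7,7); scale last.
--     arm = [(i, 6) for i in range(6)] + [(6, 5 - i) for i in range(6)] + [(7, 0)]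
--     tiles = []
--     for _ in range(4):
--         tiles += arm
--         arm = [(14 - y, x) for (x, y) in arm]
--     return [(x * tile_size, y * tile_size) for (x, y) in tiles]
-- ===== Notes on version B (the rewrite author's own statement) =====
-- stated objective: alternative
-- what changed: B builds only the first 13-tile arm in unit coordinates and generates the other three arms by repeatedly applying a 90-degree rotation about the board center (7,7), scaling by tile_size at the end, instead of A's eight hand-written loops plus three literal corner tiles.
import Mathlib
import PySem

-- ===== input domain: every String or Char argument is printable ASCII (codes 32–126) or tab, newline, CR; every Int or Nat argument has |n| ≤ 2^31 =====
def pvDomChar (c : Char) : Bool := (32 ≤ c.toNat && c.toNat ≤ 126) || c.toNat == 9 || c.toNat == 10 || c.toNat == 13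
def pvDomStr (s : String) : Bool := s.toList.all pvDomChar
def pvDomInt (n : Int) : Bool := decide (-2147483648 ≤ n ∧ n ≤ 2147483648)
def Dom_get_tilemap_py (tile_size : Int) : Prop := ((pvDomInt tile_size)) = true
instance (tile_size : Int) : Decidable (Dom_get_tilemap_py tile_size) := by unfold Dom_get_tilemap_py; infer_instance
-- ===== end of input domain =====

-- B rebuilds the board from one 13-tile arm rotated 90° about the center three times (alternative decomposition; same cost).

-- ===== PORT A =====
def get_tilemap_py (tile_size : Int) : List (Int × Int) :=
  let tm : List (Int × Int) := []
  let tm := (PySem.List.pyRange 0 6 1).foldl (fun acc i => acc ++ [(i * tile_size, 6 * tile_size)]) tm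
  let tm := (PySem.List.pyRange 0 6 1).foldl (fun acc i => acc ++ [(6 * tile_size, (5 - i) * tile_size)]) tm
  let tm := tm ++ [(7 * tile_size, 0)]
  let tm := (PySem.List.pyRange 0 6 1).foldl (fun acc i => acc ++ [(8 * tile_size, i * tile_size)]) tm
  let tm := (PySem.List.pyRange 0 6 1).foldl (fun acc i => acc ++ [((9 + i) * tile_size, 6 * tile_size)]) tm
  let tm := tm ++ [(14 * tile_size, 7 * tile_size)]
  let tm := (PySem.List.pyRange 0 6 1).foldl (fun acc i => acc ++ [((14 - i) * tile_size, 8 * tile_size)]) tm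
  let tm := (PySem.List.pyRange 0 6 1).foldl (fun acc i => acc ++ [(8 * tile_size, (9 + i) * tile_size)]) tm
  let tm := tm ++ [(7 * tile_size, 14 * tile_size)]
  let tm := (PySem.List.pyRange 0 6 1).foldl (fun acc i => acc ++ [(6 * tile_size, (14 - i) * tile_size)]) tm
  let tm := (PySem.List.pyRange 0 6 1).foldl (fun acc i => acc ++ [((5 - i) * tile_size, 8 * tile_size)]) tm
  let tm := tm ++ [(0, 7 * tile_size)]
  tm

-- ===== PORT B =====
def get_tilemap_py_alt (tile_size : Int) : List (Int × Int) :=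
  let arm : List (Int × Int) :=
    ((PySem.List.pyRange 0 6 1).map (fun i => (i, (6 : Int)))) ++
    ((PySem.List.pyRange 0 6 1).map (fun i => ((6 : Int), 5 - i))) ++ [((7 : Int), (0 : Int))]
  let st := (PySem.List.pyRange 0 4 1).foldl
    (fun (st : List (Int × Int) × List (Int × Int)) _ =>
      (st.1 ++ st.2, st.2.map (fun p => (14 - p.2, p.1)))) ([], arm)
  st.1.map (fun p => (p.1 * tile_size, p.2 * tile_size))

-- ===== PRECONDITION & SPEC =====
def Spec_get_tilemap_py (tile_size : Int) (out : List (Int × Int)) : Prop := out = get_tilemap_py_alt tile_size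
instance (tile_size : Int) (out : List (Int × Int)) : Decidable (Spec_get_tilemap_py tile_size out) := by unfold Spec_get_tilemap_py; infer_instance

-- ===== CLAIM (what is proved, stated in full; the proofs are below) =====
def Claim_equal_get_tilemap_py : Prop := ∀ (tile_size : Int), Dom_get_tilemap_py tile_size → Spec_get_tilemap_py tile_size (get_tilemap_py tile_size)

-- ===== LEMMAS AND PROOFS =====

-- ===== VERDICT (by name: the statement is the Claim_ definition above) =====
lemma pvRange6 : PySem.List.pyRange 0 6 1 = [0, 1, 2, 3, 4, 5] := by decide
lemma pvRange4 : PySem.List.pyRange 0 4 1 = [0, 1, 2, 3] := by decide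

theorem get_tilemap_py_spec : Claim_equal_get_tilemap_py := by
  intro t _
  unfold Spec_get_tilemap_py get_tilemap_py get_tilemap_py_alt
  rw [pvRange6, pvRange4]
  simp only [List.foldl, List.map, List.nil_append, List.cons_append]
  norm_num
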